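-- pv_equiv track=rewrite | github.com/mmhdfmh/ygoFirstMove | scripts/calculate.py | _reduce_rule_max_value
-- ===== SOURCE A (Python) =====
-- def _reduce_rule_max_value(dict1: dict, dict2: dict) -> dict:
--     if dict1 == None:
--         return None
--     ret = dict1.copy()
--     for key, value in dict2.items():
--         ret_value = ret.get(key)
--         if ret_value != None:
--             if ret_value > 0 and value <= 0 or ret_value <= 0 and value > 0:
--                 return None
--             ret[key] = max(ret_value, value)
--         else:
--             ret[key] = value
--     return ret
-- ===== SOURCE B (Python) =====
-- def _reduce_rule_max_value(dict1: dict, dict2: dict) -> dict: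
--     if dict1 == None:
--         return None
--     ret = dict1.copy()
--     # pass 1: validate — any sign conflict between an existing entry and dict2 aborts
--     for key, value in dict2.items():
--         rv = ret.get(key)
--         if rv is not None and (rv > 0) != (value > 0):
--             return None
--     # pass 2: merge, taking the max for shared keys
--     for key, value in dict2.items():
--         if key in ret:
--             ret[key] = max(ret[key], value)
--         else:
--             ret[key] = value
--     return ret
-- ===== Notes on version B (the rewrite author's own statement) =====
-- stated objective: alternative
-- what changed: B splits A's single interleaved check-and-update loop into a validate-then-merge decomposition: a first pass checks every dict2 entry for a sign conflict against the untouched copy of dict1 (XOR form of the sign test), and only then a second pass performs the max-merge; A instead validates each entry against the partially merged dict as it mutates it.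
import Mathlib
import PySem

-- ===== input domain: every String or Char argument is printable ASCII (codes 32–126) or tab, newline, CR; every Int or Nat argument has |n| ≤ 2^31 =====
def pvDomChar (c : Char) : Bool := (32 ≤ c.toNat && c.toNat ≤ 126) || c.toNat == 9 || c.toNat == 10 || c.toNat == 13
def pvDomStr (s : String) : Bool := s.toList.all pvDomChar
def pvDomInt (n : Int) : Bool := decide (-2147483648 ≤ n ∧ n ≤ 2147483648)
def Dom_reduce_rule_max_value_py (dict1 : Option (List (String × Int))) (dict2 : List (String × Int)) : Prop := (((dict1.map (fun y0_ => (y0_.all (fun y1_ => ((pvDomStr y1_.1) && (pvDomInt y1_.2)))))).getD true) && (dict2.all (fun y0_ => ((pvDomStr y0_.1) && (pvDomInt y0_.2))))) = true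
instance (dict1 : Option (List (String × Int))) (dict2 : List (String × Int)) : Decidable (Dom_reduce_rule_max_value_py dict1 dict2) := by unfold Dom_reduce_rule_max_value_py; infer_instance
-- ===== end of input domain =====

-- ===== PORT A =====
-- B restructures A's single interleaved check-and-merge loop into a validate pass
-- followed by a merge pass (return value only; neither Python mutates its arguments).

-- loop body of A: ret mutated while checking each dict2 item; None aborts
def pvAloop (ret : PySem.Dict String Int) : List (String × Int) → Option (PySem.Dict String Int)
  | [] => some ret
  | (key, value) :: rest =>
    match ret.get? key with
    | some ret_value =>
      if (0 < ret_value ∧ value ≤ 0) ∨ (ret_value ≤ 0 ∧ 0 < value) then none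
      else pvAloop (ret.insert key (max ret_value value)) rest
    | none => pvAloop (ret.insert key value) rest

def reduce_rule_max_value_py (dict1 : Option (List (String × Int))) (dict2 : List (String × Int)) : Option (List (String × Int)) :=
  match dict1 with
  | none => none
  | some l => (pvAloop (PySem.Dict.mk l) dict2).map PySem.Dict.items

-- ===== PORT B =====
-- pass 1 of B: validate every dict2 item against the untouched copy of dict1
def pvBcheck (ret : PySem.Dict String Int) (items : List (String × Int)) : Bool :=
  items.all (fun p =>
    match ret.get? p.1 with
    | some rv => decide (0 < rv) == decide (0 < p.2)
    | none => true)

-- pass 2 of B: max-merge dict2 into ret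
def pvBmerge (ret : PySem.Dict String Int) (items : List (String × Int)) : PySem.Dict String Int :=
  items.foldl (fun r p =>
    match r.get? p.1 with
    | some rv => r.insert p.1 (max rv p.2)
    | none => r.insert p.1 p.2) ret

def reduce_rule_max_value_py_alt (dict1 : Option (List (String × Int))) (dict2 : List (String × Int)) : Option (List (String × Int)) :=
  match dict1 with
  | none => none
  | some l =>
    let ret := PySem.Dict.mk l
    if pvBcheck ret dict2 then some (pvBmerge ret dict2).items else none

-- ===== PRECONDITION & SPEC =====
-- Pre_ excludes association lists dict2 with duplicate keys: dict2 is a Python dict,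
-- so such lists represent no actual Python input (a dict has unique keys).
def Pre_reduce_rule_max_value_py (dict1 : Option (List (String × Int))) (dict2 : List (String × Int)) : Prop :=
  (dict2.map Prod.fst).Nodup
instance (dict1 : Option (List (String × Int))) (dict2 : List (String × Int)) : Decidable (Pre_reduce_rule_max_value_py dict1 dict2) := by unfold Pre_reduce_rule_max_value_py; infer_instance

def pvWitness_reduce_rule_max_value_py : (Option (List (String × Int))) × (List (String × Int)) :=
  (some [("a", 1), ("b", -2)], [("a", 3), ("c", 0)])

def Spec_reduce_rule_max_value_py (dict1 : Option (List (String × Int))) (dict2 : List (String × Int)) (out : Option (List (String × Int))) : Prop := out = reduce_rule_max_value_py_alt dict1 dict2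
instance (dict1 : Option (List (String × Int))) (dict2 : List (String × Int)) (out : Option (List (String × Int))) : Decidable (Spec_reduce_rule_max_value_py dict1 dict2 out) := by unfold Spec_reduce_rule_max_value_py; infer_instance

-- ===== CLAIM (what is proved, stated in full; the proofs are below) =====
def Claim_equal_reduce_rule_max_value_py : Prop := ∀ (dict1 : Option (List (String × Int))) (dict2 : List (String × Int)), Dom_reduce_rule_max_value_py dict1 dict2 → Pre_reduce_rule_max_value_py dict1 dict2 → Spec_reduce_rule_max_value_py dict1 dict2 (reduce_rule_max_value_py dict1 dict2)

-- ===== LEMMAS AND PROOFS =====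

-- inserting at a key absent from the remaining items does not change B's validation pass
theorem pvBcheck_insert_of_not_mem (ret : PySem.Dict String Int) (k : String) (m : Int)
    (rest : List (String × Int)) (h : k ∉ rest.map Prod.fst) :
    pvBcheck (ret.insert k m) rest = pvBcheck ret rest := by
  induction rest with
  | nil => rfl
  | cons p rest ih =>
    simp only [List.map_cons, List.mem_cons, not_or] at h
    simp only [pvBcheck, List.all_cons] at *
    rw [PySem.Dict.get?_insert_of_ne ret m (Ne.symm h.1), ih h.2]

-- the core invariant: A's interleaved loop equals B's validate-then-merge, for any start dict
theorem pvAloop_eq (items : List (String × Int)) (ret : PySem.Dict String Int)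
    (hnd : (items.map Prod.fst).Nodup) :
    pvAloop ret items = if pvBcheck ret items then some (pvBmerge ret items) else none := by
  induction items generalizing ret with
  | nil => rfl
  | cons p rest ih =>
    obtain ⟨k, v⟩ := p
    simp only [List.map_cons, List.nodup_cons] at hnd
    simp only [pvAloop, pvBcheck, pvBmerge, List.all_cons, List.foldl_cons]
    cases hg : ret.get? k with
    | some rv =>
      dsimp only
      by_cases hc : (0 < rv ∧ v ≤ 0) ∨ (rv ≤ 0 ∧ 0 < v)
      · have hb : (decide (0 < rv) == decide (0 < v)) = false := by
          rw [beq_eq_false_iff_ne]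
          simp only [ne_eq, decide_eq_decide]
          omega
        simp [hc, hb]
      · have hb : (decide (0 < rv) == decide (0 < v)) = true := by
          rw [beq_iff_eq, decide_eq_decide]
          omega
        rw [if_neg hc, ih (ret.insert k (max rv v)) hnd.2,
          pvBcheck_insert_of_not_mem ret k (max rv v) rest hnd.1]
        simp only [hb, Bool.true_and]
        rfl
    | none =>
      dsimp only
      rw [ih (ret.insert k v) hnd.2,
        pvBcheck_insert_of_not_mem ret k v rest hnd.1]
      simp only [Bool.true_and]
      rfl

-- ===== VERDICT (by name: the statement is the Claim_ definition above) =====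
theorem reduce_rule_max_value_py_spec : Claim_equal_reduce_rule_max_value_py := by
  intro dict1 dict2 _ hpre
  unfold Spec_reduce_rule_max_value_py
  cases dict1 with
  | none => rfl
  | some l =>
    simp only [reduce_rule_max_value_py, reduce_rule_max_value_py_alt]
    rw [pvAloop_eq dict2 (PySem.Dict.mk l) hpre]
    split <;> simp
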